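-- pv_equiv track=rewrite | github.com/akshayyeluri/2048 | midterm.py | make_one_bet
-- ===== SOURCE A (Python) =====
-- def remove_indices(lst, indices):
--     '''
--     Return a copy of a list with the elements at the given indices removed.
--     Valid negative indices (between -1 and -(length of list)+1) can be used.
--     Out-of-bound indices are ignored.
--
--     Argument:
--       lst -- the input list
--       indices -- a list of integers representing locations in the list to remove
--
--     Return value:
--       The new list.  The old list is not altered in any way.
--     '''
--
--     newLst = []
--     for i, value in enumerate(indices):
--         if value < 0:
--             indices[i] += len(lst)
--     for i, element in enumerate(lst):
--         if i not in indices: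
--             newLst.append(element)
--     return newLst
--
-- def get_bet_info(bets, cwins):
--     '''
--     Select the next bet information for a gambling system.
--
--     Arguments:
--       bets  -- the list of bets set by the gambling system
--       cwins -- the consecutive wins (0, 1) previously
--
--     Result:
--       a two tuple containing:
--       -- the bet amount;
--       -- the indices of the 'bets' array where the bet amount was taken from
--     '''
--
--     assert len(bets) > 0
--     for bet in bets:
--         assert bet > 0
--     assert cwins in [0, 1, 2]
--     betIndices = [0]
--     if cwins in [1, 2] and len(bets) > 1:
--         betIndices.append(-1)
--     if cwins == 2 and len(bets) > 2:
--         betIndices.append(1)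
--     sumOfBet = 0
--     for index in betIndices:
--         sumOfBet += bets[index]
--     return (sumOfBet, betIndices)
--
-- def make_one_bet(bankroll, bets, cwins, next_is_win):
--     '''
--     Play a gambling system for a single bet.
--
--     Arguments:
--       bankroll    -- the player's money
--       bets        -- the list of bets set by the gambling system
--       cwins       -- the consecutive wins previously
--       next_is_win -- the next result of the game being played
--
--     Result:
--        A tuple consisting of:
--        1) the updated bankroll
--        2) the updated bets list
--        3) the updated consecutive wins (max 2)
--     '''
--
--     assert bankroll >= 0
--     assert len(bets) > 0
--     for bet in bets:
--         assert bet > 0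
--     assert cwins in [0, 1, 2]
--     assert next_is_win in [True, False]
--
--     bankrollChange, betIndices = get_bet_info(bets, cwins)
--     if bankroll < bankrollChange:
--         return (bankroll, [], 0)
--     if next_is_win:
--         bankroll += bankrollChange
--         bets = remove_indices(bets, betIndices)
--         if cwins != 2:
--             cwins += 1
--     else:
--         bankroll -= bankrollChange
--         bets.append(bankrollChange)
--         cwins = 0
--     return (bankroll, bets, cwins)
-- ===== SOURCE B (Python) =====
-- def make_one_bet(bankroll, bets, cwins, next_is_win):
--     '''
--     Play a gambling system for a single bet (same contract as the original,
--     computed directly: front/back cut counts and a slice instead of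
--     index-list bookkeeping and an index-filtering copy loop).
--     On a loss it appends to the given bets list, like the original.
--     '''
--     assert bankroll >= 0
--     assert len(bets) > 0
--     for bet in bets:
--         assert bet > 0
--     assert cwins in [0, 1, 2]
--     assert next_is_win in [True, False]
--
--     n = len(bets)
--     back = 1 if cwins in (1, 2) and n > 1 else 0
--     front = 2 if cwins == 2 and n > 2 else 1
--     amount = bets[0]
--     if back:
--         amount += bets[-1]
--     if front == 2:
--         amount += bets[1]
--     if bankroll < amount:
--         return (bankroll, [], 0)
--     if next_is_win:
--         return (bankroll + amount, bets[front:n - back], min(cwins + 1, 2))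
--     bets.append(amount)
--     return (bankroll - amount, bets, 0)
-- ===== Notes on version B (the rewrite author's own statement) =====
-- stated objective: simpler
-- what changed: Inlines get_bet_info and remove_indices: derives front/back cut counts from cwins and len(bets), sums the bet amount directly, and on a win returns a single slice bets[front:n-back] instead of normalizing an index list and filtering the list element-by-element against it.
import Mathlib
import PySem

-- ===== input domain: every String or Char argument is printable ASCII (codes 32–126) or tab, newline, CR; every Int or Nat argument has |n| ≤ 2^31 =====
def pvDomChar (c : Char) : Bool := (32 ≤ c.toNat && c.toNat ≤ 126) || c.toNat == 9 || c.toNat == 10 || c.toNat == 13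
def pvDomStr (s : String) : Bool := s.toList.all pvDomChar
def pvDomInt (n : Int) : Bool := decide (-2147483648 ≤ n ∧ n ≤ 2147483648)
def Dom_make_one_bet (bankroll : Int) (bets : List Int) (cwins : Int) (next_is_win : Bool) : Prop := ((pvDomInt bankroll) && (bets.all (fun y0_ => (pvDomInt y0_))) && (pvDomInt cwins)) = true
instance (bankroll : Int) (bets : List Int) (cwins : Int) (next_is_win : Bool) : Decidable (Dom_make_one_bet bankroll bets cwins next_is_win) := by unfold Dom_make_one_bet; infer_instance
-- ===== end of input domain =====

-- B replaces A's index-list bookkeeping + filtering copy loop by front/back cut counts and one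
-- slice (objective: simpler). Both programs append to the argument list on the loss branch;
-- the equivalence proved here is about the return value.

-- ===== PORT A =====
def remove_indices (lst : List Int) (indices : List Int) : List Int :=
  -- first loop: in-place normalization of negative indices (read-then-write per slot = map)
  let indices' := indices.map (fun v => if v < 0 then v + (lst.length : Int) else v)
  -- second loop: copy elements whose position is not in the index list
  (PySem.List.enumerate lst).foldl
    (fun newLst p => if p.1 ∈ indices' then newLst else newLst ++ [p.2]) []

def get_bet_info (bets : List Int) (cwins : Int) : Int × List Int :=
  let betIndices : List Int := [0]
  let betIndices := if (cwins = 1 ∨ cwins = 2) ∧ bets.length > 1 then betIndices ++ [-1] else betIndices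
  let betIndices := if cwins = 2 ∧ bets.length > 2 then betIndices ++ [1] else betIndices
  -- indices are in range whenever the asserts pass (Pre_); getD 0 is never the none case there
  let sumOfBet := betIndices.foldl (fun s idx => s + (PySem.List.pyGet? bets idx).getD 0) 0
  (sumOfBet, betIndices)

def make_one_bet (bankroll : Int) (bets : List Int) (cwins : Int) (next_is_win : Bool) : Int × List Int × Int :=
  let info := get_bet_info bets cwins
  let bankrollChange := info.1
  let betIndices := info.2
  if bankroll < bankrollChange then (bankroll, [], 0)
  else if next_is_win then
    (bankroll + bankrollChange, remove_indices bets betIndices,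
     if cwins ≠ 2 then cwins + 1 else cwins)
  else (bankroll - bankrollChange, bets ++ [bankrollChange], 0)

-- ===== PORT B =====
def make_one_bet_alt (bankroll : Int) (bets : List Int) (cwins : Int) (next_is_win : Bool) : Int × List Int × Int :=
  let n := bets.length
  let back : Int := if (cwins = 1 ∨ cwins = 2) ∧ n > 1 then 1 else 0
  let front : Int := if cwins = 2 ∧ n > 2 then 2 else 1
  let amount := (PySem.List.pyGet? bets 0).getD 0
  let amount := if back ≠ 0 then amount + (PySem.List.pyGet? bets (-1)).getD 0 else amount
  let amount := if front = 2 then amount + (PySem.List.pyGet? bets 1).getD 0 else amount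
  if bankroll < amount then (bankroll, [], 0)
  else if next_is_win then
    (bankroll + amount, PySem.List.slice bets (some front) (some ((n : Int) - back)),
     min (cwins + 1) 2)
  else (bankroll - amount, bets ++ [amount], 0)

-- ===== PRECONDITION & SPEC =====
-- Pre_ = exactly A's asserts: nonneg bankroll, nonempty all-positive bets, cwins in {0,1,2}.
def Pre_make_one_bet (bankroll : Int) (bets : List Int) (cwins : Int) (next_is_win : Bool) : Prop :=
  0 ≤ bankroll ∧ bets ≠ [] ∧ (∀ b ∈ bets, 0 < b) ∧ (cwins = 0 ∨ cwins = 1 ∨ cwins = 2)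
instance (bankroll : Int) (bets : List Int) (cwins : Int) (next_is_win : Bool) : Decidable (Pre_make_one_bet bankroll bets cwins next_is_win) := by unfold Pre_make_one_bet; infer_instance

def pvWitness_make_one_bet : Int × List Int × Int × Bool := (10, [1, 2], 1, true)

def Spec_make_one_bet (bankroll : Int) (bets : List Int) (cwins : Int) (next_is_win : Bool) (out : Int × List Int × Int) : Prop := out = make_one_bet_alt bankroll bets cwins next_is_win
instance (bankroll : Int) (bets : List Int) (cwins : Int) (next_is_win : Bool) (out : Int × List Int × Int) : Decidable (Spec_make_one_bet bankroll bets cwins next_is_win out) := by unfold Spec_make_one_bet; infer_instance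

-- ===== CLAIM (what is proved, stated in full; the proofs are below) =====
def Claim_equal_make_one_bet : Prop := ∀ (bankroll : Int) (bets : List Int) (cwins : Int) (next_is_win : Bool), Dom_make_one_bet bankroll bets cwins next_is_win → Pre_make_one_bet bankroll bets cwins next_is_win → Spec_make_one_bet bankroll bets cwins next_is_win (make_one_bet bankroll bets cwins next_is_win)

-- ===== LEMMAS AND PROOFS =====

-- the filtering copy loop keeps everything when the forbidden-index predicate
-- holds only before the start index
theorem rem_keep {P : Int → Prop} [DecidablePred P] (t : List Int) (s : Int) (acc : List Int)
    (h : ∀ j, P j → j < s) :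
    (PySem.List.enumerate t s).foldl
      (fun newLst p => if P p.1 then newLst else newLst ++ [p.2]) acc = acc ++ t := by
  induction t generalizing s acc with
  | nil => simp [PySem.List.enumerate_nil]
  | cons x r ih =>
      rw [PySem.List.enumerate_cons]
      have hs : ¬ P s := fun hm => absurd (h s hm) (by omega)
      simp only [List.foldl_cons, if_neg hs]
      rw [ih (s + 1) (acc ++ [x]) (fun j hj => by have := h j hj; omega)]
      simp

-- the filtering copy loop drops exactly the last element when, from the start
-- index on, the forbidden-index predicate holds exactly at the last position
theorem rem_droplast {P : Int → Prop} [DecidablePred P] (t : List Int) (s : Int) (acc : List Int)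
    (h : ∀ j, s ≤ j → (P j ↔ j = s + (t.length : Int) - 1)) (ht : t ≠ []) :
    (PySem.List.enumerate t s).foldl
      (fun newLst p => if P p.1 then newLst else newLst ++ [p.2]) acc = acc ++ t.dropLast := by
  induction t generalizing s acc with
  | nil => exact absurd rfl ht
  | cons x r ih =>
      rw [PySem.List.enumerate_cons]
      cases r with
      | nil =>
          have hm : P s := by rw [h s le_rfl]; simp
          simp [PySem.List.enumerate_nil, if_pos hm]
      | cons y q =>
          have hs : ¬ P s := by
            rw [h s le_rfl]; simp only [List.length_cons]; push_cast; omega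
          simp only [List.foldl_cons, if_neg hs]
          rw [ih (s + 1) (acc ++ [x])
                (fun j hj => by
                  rw [h j (by omega)]
                  simp only [List.length_cons]; push_cast; omega)
                (by simp)]
          simp

-- remove_indices on the concrete (already index-normalized) lists A builds
theorem rem0 (a : Int) (t : List Int) : remove_indices (a :: t) [0] = t := by
  unfold remove_indices
  norm_num
  rw [rem_keep (P := fun j => j = 0) t 1 [] (by omega)]
  simp

theorem rem01 (a b : Int) (r : List Int) :
    remove_indices (a :: b :: r) [0, -1] = (b :: r).dropLast := by
  unfold remove_indices
  norm_num
  cases r with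
  | nil => norm_num [PySem.List.enumerate_nil]
  | cons y q =>
      rw [if_neg (by simp : ¬(y :: q) = [])]
      rw [rem_droplast (P := fun j => j = 0 ∨ j = (((y :: q).length : Nat) : Int) + 1) (y :: q) 2 [b]
            (by intro j hj; simp only [List.length_cons]; push_cast; omega) (by simp)]
      simp

theorem rem011 (a b c : Int) (r : List Int) :
    remove_indices (a :: b :: c :: r) [0, -1, 1] = (c :: r).dropLast := by
  unfold remove_indices
  norm_num
  cases r with
  | nil => norm_num [PySem.List.enumerate_nil]
  | cons y q =>
      rw [if_neg (by simp only [List.length_cons]; push_cast; omega : ¬(2 : Int) = ((((y :: q).length : Nat) : Int) + 1 + 1))]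
      rw [rem_droplast (P := fun j => j = 0 ∨ j = (((y :: q).length : Nat) : Int) + 1 + 1 ∨ j = 1) (y :: q) 3 [c]
            (by intro j hj; simp only [List.length_cons]; push_cast; omega) (by simp)]
      simp

-- the slices B takes, in the same three shapes
theorem sl_tail (a : Int) (t : List Int) :
    PySem.List.slice (a :: t) (some 1) (some ((t.length : Int) + 1)) = t := by
  rw [PySem.List.slice_toNat _ (by norm_num) (by positivity)]
  simp

theorem sl_mid1 (a b : Int) (r : List Int) :
    PySem.List.slice (a :: b :: r) (some 1) (some ((r.length : Int) + 1)) = (b :: r).dropLast := by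
  rw [PySem.List.slice_toNat _ (by norm_num) (by positivity)]
  simp [List.dropLast_eq_take]

theorem sl_mid2 (a b c : Int) (r : List Int) :
    PySem.List.slice (a :: b :: c :: r) (some 2) (some ((r.length : Int) + 1 + 1)) = (c :: r).dropLast := by
  rw [PySem.List.slice_toNat _ (by norm_num) (by positivity)]
  simp [List.dropLast_eq_take]
  omega

-- ===== VERDICT (by name: the statement is the Claim_ definition above) =====
theorem make_one_bet_spec : Claim_equal_make_one_bet := by
  intro bankroll bets cwins next_is_win _ hpre
  obtain ⟨hb, hne, hpos, hc⟩ := hpre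
  obtain ⟨a, t, rfl⟩ : ∃ a t, bets = a :: t := by
    cases bets with
    | nil => exact absurd rfl hne
    | cons a t => exact ⟨a, t, rfl⟩
  unfold Spec_make_one_bet make_one_bet make_one_bet_alt get_bet_info
  rcases hc with rfl | rfl | rfl
  · -- cwins = 0: indices [0], back = 0, front = 1
    norm_num
    rw [rem0, sl_tail]
  · -- cwins = 1
    cases t with
    | nil =>
        norm_num
        rw [rem0, PySem.List.slice_toNat _ (by norm_num) (by norm_num)]
        norm_num
    | cons b r =>
        norm_num
        rw [rem01, sl_mid1]
  · -- cwins = 2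
    cases t with
    | nil =>
        norm_num
        rw [rem0, PySem.List.slice_toNat _ (by norm_num) (by norm_num)]
        norm_num
    | cons b r =>
        cases r with
        | nil =>
            norm_num
            rw [rem01, PySem.List.slice_toNat _ (by norm_num) (by norm_num)]
            norm_num
        | cons c q =>
            norm_num
            rw [rem011, sl_mid2]
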